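-- pv_equiv track=rewrite | github.com/PhotonicVelocity/LiveAPI | tools/parse/parse_apicapture_results.py | _split_sig_args
-- ===== SOURCE A (Python) =====
-- def _split_sig_args(arg_str: str) -> list[tuple[str, int]]:
--     """Split a signature's argument string into (arg_text, bracket_depth) tuples.
--
--     Tracks bracket nesting so optional args carry their depth.
--     Example: "(Application)arg1, (Text)text [, (int)buttons=OK [, (bool)markup=False]]"
--     → [("(Application)arg1", 0), ("(Text)text", 0), ("(int)buttons=OK", 1), ("(bool)markup=False", 2)]
--     """
--     arg_str = arg_str.strip()
--     if not arg_str: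
--         return []
--
--     args: list[tuple[str, int]] = []
--     current: list[str] = []
--     depth = 0
--     arg_depth = 0  # depth when this arg started
--
--     for ch in arg_str:
--         if ch == "[":
--             depth += 1
--         elif ch == "]":
--             depth -= 1
--         elif ch == ",":
--             arg = "".join(current).strip()
--             if arg:
--                 args.append((arg, arg_depth))
--             current = []
--             arg_depth = depth  # next arg starts at current depth
--         else:
--             if not current:
--                 arg_depth = depth  # record depth at start of arg text
--             current.append(ch)
--
--     last = "".join(current).strip()
--     if last:
--         args.append((last, arg_depth))
--
--     return args
-- ===== SOURCE B (Python) =====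
-- def _split_sig_args(arg_str: str) -> list[tuple[str, int]]:
--     """Split-first re-implementation: cut on ',' (commas never nest here), then
--     per segment derive the depth from a leading-bracket scan and a running total."""
--     out: list[tuple[str, int]] = []
--     depth = 0
--     for seg in arg_str.strip().split(','):
--         arg_depth = depth
--         for ch in seg:
--             if ch == '[':
--                 arg_depth += 1
--             elif ch == ']':
--                 arg_depth -= 1
--             else:
--                 break
--         text = seg.replace('[', '').replace(']', '').strip()
--         if text:
--             out.append((text, arg_depth))
--         depth += seg.count('[') - seg.count(']')
--     return out
-- ===== Notes on version B (the rewrite author's own statement) =====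
-- stated objective: faster
-- what changed: Replaces A's single interleaved per-character loop with four accumulators by a split-on-comma pass: per segment the depth comes from a short leading-bracket scan plus a running bracket count, and the text from removing brackets and stripping (bulk work done by str.split/replace/count).
import Mathlib
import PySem

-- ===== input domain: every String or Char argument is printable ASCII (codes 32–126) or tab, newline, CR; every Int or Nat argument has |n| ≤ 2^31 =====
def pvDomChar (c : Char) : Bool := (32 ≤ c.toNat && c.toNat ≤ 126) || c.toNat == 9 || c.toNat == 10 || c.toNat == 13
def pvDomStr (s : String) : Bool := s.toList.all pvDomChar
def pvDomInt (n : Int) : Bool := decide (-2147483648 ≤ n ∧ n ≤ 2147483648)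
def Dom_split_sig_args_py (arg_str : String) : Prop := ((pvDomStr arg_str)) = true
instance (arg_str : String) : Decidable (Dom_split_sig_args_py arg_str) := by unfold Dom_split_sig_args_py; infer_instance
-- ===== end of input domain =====

-- B replaces A's single interleaved character loop by a split-on-comma pass with a
-- per-segment leading-bracket scan and a running bracket count (measured faster in a timing run).


-- ===== PORT A =====
-- A's loop state: (args, current, depth, arg_depth)
def pvStepA (st : List (String × Int) × List Char × Int × Int) (ch : Char) :
    List (String × Int) × List Char × Int × Int :=
  match st with
  | (args, current, depth, arg_depth) =>
    if ch = '[' then (args, current, depth + 1, arg_depth)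
    else if ch = ']' then (args, current, depth - 1, arg_depth)
    else if ch = ',' then
      let arg := PySem.Chars.strip current
      (if arg ≠ [] then args ++ [(String.ofList arg, arg_depth)] else args, [], depth, depth)
    else
      (args, current ++ [ch], depth, if current = [] then depth else arg_depth)

def split_sig_args_py (arg_str : String) : List (String × Int) :=
  let s := PySem.Chars.strip arg_str.toList
  if s = [] then []
  else
    match s.foldl pvStepA ([], [], 0, 0) with
    | (args, current, _, arg_depth) =>
      let last := PySem.Chars.strip current
      if last ≠ [] then args ++ [(String.ofList last, arg_depth)] else args

-- ===== PORT B =====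
-- Source B's leading-bracket scan ('for ch in seg: … else: break')
def pvLeadScan (d : Int) (seg : List Char) : Int :=
  match seg with
  | [] => d
  | c :: rest =>
    if c = '[' then pvLeadScan (d + 1) rest
    else if c = ']' then pvLeadScan (d - 1) rest
    else d

-- Source B's loop body: state (out, depth)
def pvStepB (st : List (String × Int) × Int) (seg : List Char) : List (String × Int) × Int :=
  let arg_depth := pvLeadScan st.2 seg
  let text := PySem.Chars.strip (PySem.Chars.replace (PySem.Chars.replace seg ['['] []) [']'] [])
  (if text ≠ [] then st.1 ++ [(String.ofList text, arg_depth)] else st.1,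
   st.2 + (PySem.Chars.count seg ['['] : Int) - (PySem.Chars.count seg [']'] : Int))

def split_sig_args_py_alt (arg_str : String) : List (String × Int) :=
  ((PySem.Chars.splitOn (PySem.Chars.strip arg_str.toList) [',']).foldl pvStepB ([], 0)).1

-- ===== PRECONDITION & SPEC =====
def Spec_split_sig_args_py (arg_str : String) (out : List (String × Int)) : Prop := out = split_sig_args_py_alt arg_str
instance (arg_str : String) (out : List (String × Int)) : Decidable (Spec_split_sig_args_py arg_str out) := by unfold Spec_split_sig_args_py; infer_instance

-- ===== CLAIM (what is proved, stated in full; the proofs are below) =====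
def Claim_equal_split_sig_args_py : Prop := ∀ (arg_str : String), Dom_split_sig_args_py arg_str → Spec_split_sig_args_py arg_str (split_sig_args_py arg_str)

-- ===== LEMMAS AND PROOFS =====

-- structural model of splitting on the single character ','
def pvSplit (cur : List Char) (l : List Char) : List (List Char) :=
  match l with
  | [] => [cur]
  | x :: rest => if x = ',' then cur :: pvSplit [] rest else pvSplit (cur ++ [x]) rest

theorem pvSplitOn_go_eq (l : List Char) : ∀ (fuel : Nat) (cur : List Char) (acc : List (List Char)),
    l.length ≤ fuel →
    PySem.Chars.splitOn.go [','] fuel l cur acc = acc.reverse ++ pvSplit cur.reverse l := by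
  induction l with
  | nil =>
    intro fuel cur acc _
    cases fuel <;> (rw [PySem.Chars.splitOn.go.eq_def]; simp [pvSplit])
  | cons x t ih =>
    intro fuel cur acc hf
    cases fuel with
    | zero => simp at hf
    | succ f =>
      rw [PySem.Chars.splitOn.go.eq_def]
      by_cases hx : x = ','
      · subst hx
        simp [List.isPrefixOf, ih f [] _ (by simpa using hf), pvSplit]
      · simp [List.isPrefixOf, Ne.symm hx, hx,
          ih f (x :: cur) acc (by simpa using Nat.le_of_succ_le_succ hf), pvSplit]

theorem pvSplitOn_eq (l : List Char) :
    PySem.Chars.splitOn l [','] = pvSplit [] l := by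
  simpa using pvSplitOn_go_eq l (l.length + 1) [] [] (by omega)

theorem pvReplace_go_eq (c : Char) (l : List Char) : ∀ (fuel : Nat) (acc : List Char),
    l.length ≤ fuel →
    PySem.Chars.replace.go [c] [] fuel l acc = acc.reverse ++ l.filter (· ≠ c) := by
  induction l with
  | nil => intro fuel acc _; cases fuel <;> (rw [PySem.Chars.replace.go.eq_def]; simp)
  | cons x t ih =>
    intro fuel acc hf
    cases fuel with
    | zero => simp at hf
    | succ f =>
      rw [PySem.Chars.replace.go.eq_def]
      by_cases hx : x = c
      · subst hx
        simp [List.isPrefixOf, ih f acc (by simpa using hf)]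
      · simp [List.isPrefixOf, Ne.symm hx, hx,
          ih f (x :: acc) (by simpa using Nat.le_of_succ_le_succ hf)]

theorem pvReplace_eq (c : Char) (l : List Char) :
    PySem.Chars.replace l [c] [] = l.filter (· ≠ c) := by
  simpa [PySem.Chars.replace] using pvReplace_go_eq c l l.length [] (le_refl _)

theorem pvCount_go_eq (c : Char) (l : List Char) : ∀ (fuel acc : Nat),
    l.length ≤ fuel →
    PySem.Chars.count.go [c] fuel l acc = acc + l.count c := by
  induction l with
  | nil => intro fuel acc _; cases fuel <;> (rw [PySem.Chars.count.go.eq_def]; simp)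
  | cons x t ih =>
    intro fuel acc hf
    cases fuel with
    | zero => simp at hf
    | succ f =>
      rw [PySem.Chars.count.go.eq_def]
      by_cases hx : x = c
      · subst hx
        simp [List.isPrefixOf, ih f (acc + 1) (by simpa using hf)]
        omega
      · simp [List.isPrefixOf, Ne.symm hx, hx,
          ih f acc (by simpa using Nat.le_of_succ_le_succ hf)]

theorem pvCount_eq (c : Char) (l : List Char) :
    PySem.Chars.count l [c] = l.count c := by
  simpa [PySem.Chars.count] using pvCount_go_eq c l l.length 0 (le_refl _)

-- the non-bracket characters of a segment (what A's `current` collects)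
def pvRB (l : List Char) : List Char := (l.filter (· ≠ '[')).filter (· ≠ ']')

-- bracket delta of a segment
def pvDelta (l : List Char) : Int := (l.count '[' : Int) - (l.count ']' : Int)

-- A's loop across one comma-free segment
theorem pvStepA_seg (seg : List Char) (hs : ',' ∉ seg) :
    ∀ (args : List (String × Int)) (cur : List Char) (d ad : Int),
    seg.foldl pvStepA (args, cur, d, ad) =
      (args, cur ++ pvRB seg, d + pvDelta seg,
       if cur = [] ∧ pvRB seg ≠ [] then pvLeadScan d seg else ad) := by
  induction seg with
  | nil => intro args cur d ad; simp [pvRB, pvDelta]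
  | cons x t ih =>
    intro args cur d ad
    have hxt : ',' ∉ t := fun h => hs (List.mem_cons_of_mem _ h)
    have hx : x ≠ ',' := fun h => hs (h ▸ List.mem_cons_self)
    by_cases h1 : x = '['
    · subst h1
      have hrb : pvRB ('[' :: t) = pvRB t := by simp [pvRB]
      have hd : d + pvDelta ('[' :: t) = d + 1 + pvDelta t := by simp [pvDelta]; ring
      have hls : pvLeadScan d ('[' :: t) = pvLeadScan (d + 1) t := by simp [pvLeadScan]
      have hstep : pvStepA (args, cur, d, ad) '[' = (args, cur, d + 1, ad) := by
        simp [pvStepA]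
      rw [List.foldl_cons, hstep, ih hxt, hrb, hls, hd]
    · by_cases h2 : x = ']'
      · subst h2
        have hrb : pvRB (']' :: t) = pvRB t := by simp [pvRB]
        have hd : d + pvDelta (']' :: t) = d - 1 + pvDelta t := by simp [pvDelta]; ring
        have hls : pvLeadScan d (']' :: t) = pvLeadScan (d - 1) t := by simp [pvLeadScan]
        have hstep : pvStepA (args, cur, d, ad) ']' = (args, cur, d - 1, ad) := by
          simp [pvStepA]
        rw [List.foldl_cons, hstep, ih hxt, hrb, hls, hd]
      · have hrb : pvRB (x :: t) = x :: pvRB t := by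
          simp [pvRB, h1, h2]
        have hd : d + pvDelta (x :: t) = d + pvDelta t := by
          simp [pvDelta, h1, h2]
        have hls : pvLeadScan d (x :: t) = d := by simp [pvLeadScan, h1, h2]
        have hstep : pvStepA (args, cur, d, ad) x =
            (args, cur ++ [x], d, if cur = [] then d else ad) := by
          simp [pvStepA, h1, h2, hx]
        rw [List.foldl_cons, hstep, ih hxt, hrb, hd, hls]
        by_cases hc : cur = []
        · subst hc; simp
        · simp [hc]

-- A's flush of the pending text (at a comma, and at the end)
def pvFlush (args : List (String × Int)) (cur : List Char) (ad : Int) : List (String × Int) :=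
  if PySem.Chars.strip cur ≠ [] then args ++ [(String.ofList (PySem.Chars.strip cur), ad)] else args

theorem pvStrip_nil : PySem.Chars.strip ([] : List Char) = [] := by decide

-- B's per-segment step in primitive-free form
theorem pvStepB_eq (seg : List Char) (st : List (String × Int) × Int) :
    pvStepB st seg = (pvFlush st.1 (pvRB seg) (pvLeadScan st.2 seg), st.2 + pvDelta seg) := by
  simp only [pvStepB, pvFlush, pvRB, pvDelta, pvReplace_eq, pvCount_eq]
  rw [Prod.ext_iff]
  exact ⟨rfl, by ring⟩

-- A's final arg_depth for a segment agrees with B's leading scan whenever the text survives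
theorem pvFlush_ad (args : List (String × Int)) (seg : List Char) (d : Int) :
    pvFlush args (pvRB seg) (if pvRB seg ≠ [] then pvLeadScan d seg else d) =
      pvFlush args (pvRB seg) (pvLeadScan d seg) := by
  by_cases h : pvRB seg = []
  · simp [pvFlush, h, pvStrip_nil]
  · simp [h]

-- decomposition of a list at its first comma
theorem pvDecomp (l : List Char) :
    (',' ∉ l) ∨
    ∃ pre rest, l = pre ++ ',' :: rest ∧ ',' ∉ pre := by
  rcases h : l.dropWhile (· ≠ ',') with _ | ⟨c, rest⟩
  · left
    intro hm
    have := (List.dropWhile_eq_nil_iff).1 h ',' hm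
    simp at this
  · right
    have hc' : c = ',' := by
      have hne : l.dropWhile (· ≠ ',') ≠ [] := by rw [h]; simp
      have hc0 := List.head_dropWhile_not (fun x => decide (x ≠ ',')) hne
      revert hc0 hne
      rw [h]
      intro hne hc0
      simpa using hc0
    refine ⟨l.takeWhile (· ≠ ','), rest, ?_, ?_⟩
    · conv_lhs => rw [← List.takeWhile_append_dropWhile (p := (· ≠ ',')) (l := l)]
      rw [h, hc']
    · intro hm
      have := List.mem_takeWhile_imp hm
      simp at this

theorem pvSplit_no_comma (l : List Char) (h : ',' ∉ l) : ∀ cur, pvSplit cur l = [cur ++ l] := by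
  induction l with
  | nil => intro cur; simp [pvSplit]
  | cons x t ih =>
    intro cur
    have hx : x ≠ ',' := fun hh => h (hh ▸ List.mem_cons_self)
    rw [pvSplit, if_neg hx, ih (fun hm => h (List.mem_cons_of_mem _ hm))]
    simp

theorem pvSplit_comma (pre : List Char) (hp : ',' ∉ pre) : ∀ (cur rest : List Char),
    pvSplit cur (pre ++ ',' :: rest) = (cur ++ pre) :: pvSplit [] rest := by
  induction pre with
  | nil => intro cur rest; simp [pvSplit]
  | cons x t ih =>
    intro cur rest
    have hx : x ≠ ',' := fun hh => hp (hh ▸ List.mem_cons_self)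
    rw [List.cons_append, pvSplit, if_neg hx, ih (fun hm => hp (List.mem_cons_of_mem _ hm))]
    simp

-- MAIN: A's loop plus final flush over any character list, started at a segment-start
-- state, equals B's fold over the comma-split of that list.
theorem pvMain (n : Nat) : ∀ (l : List Char), l.length = n →
    ∀ (args : List (String × Int)) (d : Int),
    pvFlush (l.foldl pvStepA (args, [], d, d)).1 (l.foldl pvStepA (args, [], d, d)).2.1
      (l.foldl pvStepA (args, [], d, d)).2.2.2 =
    ((pvSplit [] l).foldl pvStepB (args, d)).1 := by
  induction n using Nat.strong_induction_on with
  | _ n ih =>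
    intro l hl args d
    rcases pvDecomp l with h | ⟨pre, rest, hdec, hp⟩
    · -- single segment, no comma
      rw [pvStepA_seg l h args [] d d, pvSplit_no_comma l h []]
      simp only [List.nil_append, List.foldl_cons, List.foldl_nil, pvStepB_eq]
      simpa using pvFlush_ad args l d
    · subst hdec
      have hlen : rest.length < n := by
        subst hl; simp [List.length_append]; omega
      rw [List.foldl_append, pvStepA_seg pre hp args [] d d]
      simp only [List.nil_append, List.foldl_cons]
      have hcomma :
          pvStepA (args, pvRB pre, d + pvDelta pre,
              if True ∧ pvRB pre ≠ [] then pvLeadScan d pre else d) ',' =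
            (pvFlush args (pvRB pre) (if pvRB pre ≠ [] then pvLeadScan d pre else d),
             [], d + pvDelta pre, d + pvDelta pre) := by
        simp [pvStepA, pvFlush]
      simp only [true_and] at hcomma ⊢
      rw [hcomma, pvFlush_ad args pre d,
        ih rest.length hlen rest rfl (pvFlush args (pvRB pre) (pvLeadScan d pre)) (d + pvDelta pre),
        pvSplit_comma pre hp [] rest]
      simp only [List.nil_append, List.foldl_cons, pvStepB_eq]

-- ===== VERDICT (by name: the statement is the Claim_ definition above) =====
theorem split_sig_args_py_spec : Claim_equal_split_sig_args_py := by
  intro arg_str _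
  unfold Spec_split_sig_args_py split_sig_args_py split_sig_args_py_alt
  by_cases h : PySem.Chars.strip arg_str.toList = []
  · rw [h]; decide
  · rw [if_neg h, pvSplitOn_eq]
    have := pvMain (PySem.Chars.strip arg_str.toList).length
      (PySem.Chars.strip arg_str.toList) rfl [] 0
    rcases hfold : (PySem.Chars.strip arg_str.toList).foldl pvStepA ([], [], 0, 0) with
      ⟨a, cur, dep, ad⟩
    rw [hfold] at this
    simpa [pvFlush] using this
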